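-- pv_equiv track=rewrite | github.com/matheusalefe/PI-Q2-2023 | Semana 8/Ex09.py | criar_matriz
-- ===== SOURCE A (Python) =====
-- def criar_matriz(l:int, c:int):
--     matriz = []
--     for i in range(l):
--         linha = []
--         for j in range(c):
--             if i <= (l-1)/2:
--                 linha.append(11)
--             else:
--                 linha.append(22)
--         matriz.append(linha)
--     return matriz
-- ===== SOURCE B (Python) =====
-- def criar_matriz(l, c):
--     k = (l + 1) // 2 if l > 0 else 0
--     return [[11] * c for _ in range(k)] + [[22] * c for _ in range(l - k)]
-- ===== Notes on version B (the rewrite author's own statement) =====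
-- stated objective: simpler
-- what changed: Computes the 11/22 row cutoff k=(l+1)//2 in closed form and builds the matrix as two homogeneous replicated blocks, replacing the per-cell branch inside nested loops.
import Mathlib
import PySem

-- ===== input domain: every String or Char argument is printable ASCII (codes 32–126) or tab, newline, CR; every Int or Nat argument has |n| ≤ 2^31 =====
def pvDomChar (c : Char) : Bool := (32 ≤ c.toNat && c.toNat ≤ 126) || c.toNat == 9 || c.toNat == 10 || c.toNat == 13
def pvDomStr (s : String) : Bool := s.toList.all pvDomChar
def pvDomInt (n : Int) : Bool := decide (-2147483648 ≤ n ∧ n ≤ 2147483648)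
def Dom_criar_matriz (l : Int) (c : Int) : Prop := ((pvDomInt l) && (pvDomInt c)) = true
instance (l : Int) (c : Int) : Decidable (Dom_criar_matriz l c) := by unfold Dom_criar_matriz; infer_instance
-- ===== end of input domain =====

-- ===== PORT A =====
-- B builds the matrix as two replicated blocks from a closed-form cutoff instead of a per-cell branch in nested loops.
-- A's test 'i <= (l-1)/2' is Python float true division; for integers i with |l| ≤ 2^31 the
-- float (l-1)/2 is exact (a half-integer), so 'i <= (l-1)/2' is exactly '2*i ≤ l-1' — ported so.
def criar_matriz (l : Int) (c : Int) : List (List Int) :=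
  (PySem.List.pyRange 0 l 1).foldl (fun matriz i =>
    matriz ++ [ (PySem.List.pyRange 0 c 1).foldl (fun linha _j =>
        if 2*i ≤ l - 1 then linha ++ [(11 : Int)] else linha ++ [(22 : Int)]) [] ]) []

-- ===== PORT B =====
def criar_matriz_alt (l : Int) (c : Int) : List (List Int) :=
  let k : Int := if l > 0 then PySem.Int.floordiv (l + 1) 2 else 0
  List.replicate k.toNat (List.replicate c.toNat (11 : Int))
    ++ List.replicate (l - k).toNat (List.replicate c.toNat (22 : Int))

-- ===== PRECONDITION & SPEC =====
def Spec_criar_matriz (l : Int) (c : Int) (out : List (List Int)) : Prop := out = criar_matriz_alt l c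
instance (l : Int) (c : Int) (out : List (List Int)) : Decidable (Spec_criar_matriz l c out) := by unfold Spec_criar_matriz; infer_instance

-- ===== CLAIM (what is proved, stated in full; the proofs are below) =====
def Claim_equal_criar_matriz : Prop := ∀ (l : Int) (c : Int), Dom_criar_matriz l c → Spec_criar_matriz l c (criar_matriz l c)

-- ===== LEMMAS AND PROOFS =====

-- append-fold is init ++ map
theorem foldl_append_map {α β : Type} (g : α → β) :
    ∀ (xs : List α) (init : List β),
      xs.foldl (fun acc x => acc ++ [g x]) init = init ++ xs.map g := by
  intro xs
  induction xs with
  | nil => intro init; simp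
  | cons x xs ih => intro init; simp [List.foldl, ih]

-- the inner loop appends a constant, so it builds a replicate
theorem foldl_const_append {α β : Type} (v : β) :
    ∀ (xs : List α) (init : List β),
      xs.foldl (fun acc _ => acc ++ [v]) init = init ++ List.replicate xs.length v := by
  intro xs
  induction xs with
  | nil => intro init; simp
  | cons x xs ih =>
      intro init
      simp [List.foldl, ih]
      rw [← List.replicate_succ, List.replicate_succ']

-- a threshold-valued map over range splits into two replicate blocks
theorem map_range_threshold {β : Type} (a b : β) (t : Nat) :
    ∀ n : Nat, (List.range n).map (fun i => if i < t then a else b)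
      = List.replicate (min n t) a ++ List.replicate (n - t) b := by
  intro n
  induction n with
  | zero => simp
  | succ n ih =>
      rw [List.range_succ, List.map_append, ih]
      by_cases h : n < t
      · have h3 : n - t = 0 := by omega
        have h4 : n + 1 - t = 0 := by omega
        have h1 : min (n+1) t = (min n t) + 1 := by omega
        rw [h1, h3, h4, List.replicate_succ']
        simp [h]
      · have h1 : min (n+1) t = min n t := by omega
        have h2 : n + 1 - t = (n - t) + 1 := by omega
        rw [h1, h2, List.replicate_succ']
        simp [h]

-- ===== VERDICT (by name: the statement is the Claim_ definition above) =====
theorem criar_matriz_spec : Claim_equal_criar_matriz := by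
  intro l c _
  unfold Spec_criar_matriz criar_matriz criar_matriz_alt
  set k : Int := if l > 0 then PySem.Int.floordiv (l + 1) 2 else 0 with hk
  have hfd : PySem.Int.floordiv (l + 1) 2 = (l + 1) / 2 := by
    simp [PySem.Int.floordiv, Int.fdiv_eq_ediv_of_nonneg]
  have hinner : ∀ i : Int,
      (PySem.List.pyRange 0 c 1).foldl (fun linha _j =>
          if 2*i ≤ l - 1 then linha ++ [(11 : Int)] else linha ++ [(22 : Int)]) []
      = if 2*i ≤ l - 1 then List.replicate c.toNat (11:Int) else List.replicate c.toNat (22:Int) := by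
    intro i
    by_cases h : 2*i ≤ l - 1 <;>
      simp only [h, if_pos, if_neg, not_false_iff, foldl_const_append,
        PySem.List.length_pyRange_one, List.nil_append, sub_zero]
  rw [foldl_append_map, List.nil_append]
  simp only [hinner]
  rw [PySem.List.pyRange_one]
  simp only [sub_zero, zero_add, List.map_map, Function.comp_def]
  have hcong : (List.range l.toNat).map (fun j : Nat =>
        if 2*((j:Nat):Int) ≤ l - 1 then List.replicate c.toNat (11:Int) else List.replicate c.toNat (22:Int))
      = (List.range l.toNat).map (fun j => if j < k.toNat
          then List.replicate c.toNat (11:Int) else List.replicate c.toNat (22:Int)) := by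
    apply List.map_congr_left
    intro j hj
    have hiff : (2*(j:Int) ≤ l - 1) ↔ (j < k.toNat) := by
      rw [hk]
      by_cases hl : l > 0 <;> simp only [hl, if_pos, if_neg, not_false_iff, hfd] <;> omega
    by_cases h : 2*(j:Int) ≤ l - 1
    · simp [h, hiff.mp h]
    · have h2 := (not_iff_not.mpr hiff).mp h
      simp [h, h2]
  rw [hcong, map_range_threshold]
  have h1 : min l.toNat k.toNat = k.toNat := by
    rw [hk]; by_cases hl : l > 0 <;> simp only [hl, if_pos, if_neg, not_false_iff, hfd] <;> omega
  have h2 : l.toNat - k.toNat = (l - k).toNat := by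
    rw [hk]; by_cases hl : l > 0 <;> simp only [hl, if_pos, if_neg, not_false_iff, hfd] <;> omega
  rw [h1, h2]
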